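-- pv_equiv track=rewrite | github.com/nathanielwichman/test-repo | transcriber.py | parseEnglish
-- ===== SOURCE A (Python) =====
-- punc = "()\"“”\'[]{}"
--
-- end_punc = ".,;:!?"
--
-- def parseEnglish(line):
--     new_line = []
--     for word in line:
--         new_word = []
--         for i in range(len(word)):
--             letter = word[i]
--             if letter in punc or (letter in end_punc and (i == len(word) - 1)):
--                 if len(new_word) > 0:
--                     new_line.append("".join(new_word))
--                 new_line.append(letter)
--                 new_word = []
--             else:
--                 new_word.append(letter)
--         if len(new_word) > 0:
--             new_line.append("".join(new_word))
--     return new_line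
-- ===== SOURCE B (Python) =====
-- punc = "()\"“”\'[]{}"
--
-- end_punc = ".,;:!?"
--
-- def _tokens(word):
--     # hoist the end-of-word punctuation, then split on punc by greedy spans
--     tail = None
--     if word and word[-1] in end_punc:
--         tail = word[-1]
--         word = word[:-1]
--     toks = []
--     i = 0
--     n = len(word)
--     while i < n:
--         if word[i] in punc:
--             toks.append(word[i])
--             i += 1
--         else:
--             j = i + 1
--             while j < n and word[j] not in punc:
--                 j += 1
--             toks.append(word[i:j])
--             i = j
--     if tail is not None:
--         toks.append(tail)
--     return toks
--
-- def parseEnglish(line):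
--     return [tok for word in line for tok in _tokens(word)]
-- ===== Notes on version B (the rewrite author's own statement) =====
-- stated objective: alternative
-- what changed: B hoists the end-of-word punctuation check out of the character loop (strip a trailing end_punc char first) and tokenizes the rest by greedy span scanning over slices instead of A's per-character accumulator with an is-last-index test, emitting tokens via a flat per-word helper.
import Mathlib
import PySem

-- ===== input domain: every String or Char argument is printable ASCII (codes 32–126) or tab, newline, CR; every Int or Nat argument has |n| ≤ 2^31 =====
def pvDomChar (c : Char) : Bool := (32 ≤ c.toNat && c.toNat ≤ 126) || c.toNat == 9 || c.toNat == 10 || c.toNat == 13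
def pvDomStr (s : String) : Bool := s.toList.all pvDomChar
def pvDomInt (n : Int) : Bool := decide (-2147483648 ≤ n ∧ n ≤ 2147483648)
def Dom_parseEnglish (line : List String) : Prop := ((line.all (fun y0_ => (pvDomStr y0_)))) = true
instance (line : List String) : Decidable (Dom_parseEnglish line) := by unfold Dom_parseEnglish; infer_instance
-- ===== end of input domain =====

-- B hoists the trailing end_punc check out of the character loop and splits the rest on punc by greedy spans; alternative decomposition, same cost.

-- ===== PORT A =====
-- punc = "()\"“”'[]{}"
def puncA : List Char := ['(', ')', '"', '“', '”', '\'', '[', ']', '{', '}']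
-- end_punc = ".,;:!?"
def endPuncA : List Char := ['.', ',', ';', ':', '!', '?']

-- A's inner 'for i in range(len(word))' loop, as structural recursion over the
-- remaining letters with the same (new_line, new_word) state;
-- 'rest.isEmpty' is A's test 'i == len(word) - 1'; String.ofList is ''.join
def goA : List String → List Char → List Char → List String
  | new_line, new_word, [] =>
      if new_word.length > 0 then new_line ++ [String.ofList new_word] else new_line
  | new_line, new_word, letter :: rest =>
      if letter ∈ puncA ∨ (letter ∈ endPuncA ∧ rest.isEmpty) then
        goA ((if new_word.length > 0 then new_line ++ [String.ofList new_word] else new_line)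
              ++ [String.ofList [letter]]) [] rest
      else
        goA new_line (new_word ++ [letter]) rest

def parseEnglish (line : List String) : List String :=
  line.foldl (fun new_line word => goA new_line [] word.toList) []

-- ===== PORT B =====
-- B's while loop: a punc char is its own token, else the maximal punc-free span
-- starting here (the inner 'while j < n and word[j] not in punc' scan) is a token
def splitPunc : List Char → List String
  | [] => []
  | c :: rest =>
      if c ∈ puncA then
        String.ofList [c] :: splitPunc rest
      else
        String.ofList (c :: rest.takeWhile (· ∉ puncA))
          :: splitPunc (rest.dropWhile (· ∉ puncA))
  termination_by l => l.length
  decreasing_by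
    · simp
    · have h1 := List.length_dropWhile_le (fun x => decide (x ∉ puncA)) rest
      simp at h1 ⊢
      omega

-- _tokens: strip a trailing end_punc char first, split the rest, re-emit it at the end
def tokensB (word : List Char) : List String :=
  match word.getLast? with
  | some e =>
      if e ∈ endPuncA then splitPunc word.dropLast ++ [String.ofList [e]]
      else splitPunc word
  | none => splitPunc word

def parseEnglish_alt (line : List String) : List String :=
  line.flatMap (fun word => tokensB word.toList)

-- ===== PRECONDITION & SPEC =====
def Spec_parseEnglish (line : List String) (out : List String) : Prop := out = parseEnglish_alt line
instance (line : List String) (out : List String) : Decidable (Spec_parseEnglish line out) := by unfold Spec_parseEnglish; infer_instance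

-- ===== CLAIM (what is proved, stated in full; the proofs are below) =====
def Claim_equal_parseEnglish : Prop := ∀ (line : List String), Dom_parseEnglish line → Spec_parseEnglish line (parseEnglish line)

-- ===== LEMMAS AND PROOFS =====

theorem goA_nil (nl : List String) (nw : List Char) :
    goA nl nw [] = if nw.length > 0 then nl ++ [String.ofList nw] else nl := rfl

theorem goA_cons (nl : List String) (nw : List Char) (c : Char) (rest : List Char) :
    goA nl nw (c :: rest) =
      if c ∈ puncA ∨ (c ∈ endPuncA ∧ rest.isEmpty) then
        goA ((if nw.length > 0 then nl ++ [String.ofList nw] else nl)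
              ++ [String.ofList [c]]) [] rest
      else goA nl (nw ++ [c]) rest := rfl

-- A's loop with the end-of-word clause removed: pure punc splitting with an accumulator
def goA' : List Char → List Char → List String
  | new_word, [] =>
      if new_word.length > 0 then [String.ofList new_word] else []
  | new_word, letter :: rest =>
      if letter ∈ puncA then
        (if new_word.length > 0 then [String.ofList new_word] else [])
          ++ [String.ofList [letter]] ++ goA' [] rest
      else
        goA' (new_word ++ [letter]) rest

theorem goA'_nil (nw : List Char) :
    goA' nw [] = if nw.length > 0 then [String.ofList nw] else [] := rfl

theorem goA'_cons (nw : List Char) (c : Char) (rest : List Char) :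
    goA' nw (c :: rest) =
      if c ∈ puncA then
        (if nw.length > 0 then [String.ofList nw] else [])
          ++ [String.ofList [c]] ++ goA' [] rest
      else goA' (nw ++ [c]) rest := rfl

theorem goA_append (rest : List Char) : ∀ (nl : List String) (nw : List Char),
    goA nl nw rest = nl ++ goA [] nw rest := by
  induction rest with
  | nil =>
      intro nl nw
      rw [goA_nil, goA_nil]
      by_cases h : nw.length > 0 <;> simp [h]
  | cons c r ih =>
      intro nl nw
      rw [goA_cons, goA_cons]
      by_cases hcond : c ∈ puncA ∨ (c ∈ endPuncA ∧ r.isEmpty)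
      · rw [if_pos hcond, if_pos hcond,
          ih ((if nw.length > 0 then nl ++ [String.ofList nw] else nl) ++ [String.ofList [c]]) [],
          ih ((if nw.length > 0 then [] ++ [String.ofList nw] else []) ++ [String.ofList [c]]) []]
        by_cases h : nw.length > 0 <;> simp [h]
      · rw [if_neg hcond, if_neg hcond]
        exact ih nl (nw ++ [c])

theorem punc_disjoint : ∀ c ∈ puncA, c ∉ endPuncA := by
  have h : puncA.all (fun c => !(endPuncA.contains c)) = true := by decide
  intro c hc
  have := List.all_eq_true.mp h c hc
  simpa using this

-- A's loop = strip-the-trailing-end_punc, run the punc-only loop, re-emit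
theorem goA_split (rest : List Char) : ∀ (nw : List Char),
    goA [] nw rest =
      match rest.getLast? with
      | some e =>
          if e ∈ endPuncA then goA' nw rest.dropLast ++ [String.ofList [e]]
          else goA' nw rest
      | none => goA' nw rest := by
  induction rest with
  | nil => intro nw; simp [goA_nil, goA'_nil]
  | cons c r ih =>
      intro nw
      cases r with
      | nil =>
          rw [goA_cons]
          have hdl : ([c] : List Char).dropLast = [] := rfl
          by_cases hp : c ∈ puncA
          · have he : c ∉ endPuncA := punc_disjoint c hp
            rw [if_pos (Or.inl hp)]
            by_cases h : nw.length > 0 <;>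
              simp [List.getLast?_singleton, he, goA'_cons, hp, goA'_nil, goA_nil]
          · by_cases he : c ∈ endPuncA
            · rw [if_pos (Or.inr ⟨he, rfl⟩)]
              by_cases h : nw.length > 0 <;>
                simp [List.getLast?_singleton, he, hdl, goA'_nil, goA_nil, h]
            · rw [if_neg (by simp [hp, he])]
              by_cases h : nw.length > 0 <;>
                simp [List.getLast?_singleton, he, goA'_cons, hp, goA'_nil, goA_nil]
      | cons d r' =>
          rw [goA_cons]
          by_cases hp : c ∈ puncA
          · rw [if_pos (Or.inl hp), goA_append, ih]
            rw [List.getLast?_cons_cons, List.dropLast_cons₂]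
            cases h : (d :: r').getLast? with
            | none => simp at h
            | some e =>
                by_cases he : e ∈ endPuncA
                · simp only [he, if_true, goA'_cons, if_pos hp]
                  by_cases hn : nw.length > 0 <;> simp [hn]
                · simp only [he, if_false, goA'_cons, if_pos hp]
                  by_cases hn : nw.length > 0 <;> simp [hn]
          · rw [if_neg (by simp [hp]), ih]
            rw [List.getLast?_cons_cons, List.dropLast_cons₂]
            cases h : (d :: r').getLast? with
            | none => simp at h
            | some e =>
                by_cases he : e ∈ endPuncA
                · simp only [he, if_true, goA'_cons, if_neg hp]
                · simp only [he, if_false, goA'_cons, if_neg hp]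

theorem splitPunc_cons (c : Char) (rest : List Char) :
    splitPunc (c :: rest) =
      if c ∈ puncA then
        String.ofList [c] :: splitPunc rest
      else
        String.ofList (c :: rest.takeWhile (· ∉ puncA))
          :: splitPunc (rest.dropWhile (· ∉ puncA)) := by
  rw [splitPunc]

theorem goA'_chunk : ∀ (w nw : List Char),
    goA' nw w = goA' (nw ++ w.takeWhile (· ∉ puncA)) (w.dropWhile (· ∉ puncA)) := by
  intro w
  induction w with
  | nil => simp
  | cons c r ih =>
      intro nw
      by_cases hp : c ∈ puncA
      · have ht : (c :: r).takeWhile (· ∉ puncA) = [] := by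
          rw [List.takeWhile_cons_of_neg]; simp [hp]
        have hd : (c :: r).dropWhile (· ∉ puncA) = c :: r := by
          rw [List.dropWhile_cons_of_neg]; simp [hp]
        rw [ht, hd, List.append_nil]
      · have ht : (c :: r).takeWhile (· ∉ puncA) = c :: r.takeWhile (· ∉ puncA) := by
          rw [List.takeWhile_cons_of_pos]; simp [hp]
        have hd : (c :: r).dropWhile (· ∉ puncA) = r.dropWhile (· ∉ puncA) := by
          rw [List.dropWhile_cons_of_pos]; simp [hp]
        rw [ht, hd, goA'_cons, if_neg hp, ih (nw ++ [c])]
        congr 1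
        simp

theorem goA'_eq_splitPunc (n : ℕ) : ∀ (w : List Char), w.length ≤ n →
    goA' [] w = splitPunc w := by
  induction n with
  | zero =>
      intro w hw
      have : w = [] := List.eq_nil_of_length_eq_zero (Nat.le_zero.mp hw)
      subst this
      simp [goA'_nil, splitPunc]
  | succ n ih =>
      intro w hw
      cases w with
      | nil => simp [goA'_nil, splitPunc]
      | cons c r =>
          rw [splitPunc_cons]
          by_cases hp : c ∈ puncA
          · rw [if_pos hp, goA'_cons, if_pos hp,
              ih r (by simpa using Nat.le_of_succ_le_succ hw)]
            simp
          · rw [if_neg hp, goA'_chunk]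
            have ht : (c :: r).takeWhile (· ∉ puncA) = c :: r.takeWhile (· ∉ puncA) := by
              rw [List.takeWhile_cons_of_pos]; simp [hp]
            have hd : (c :: r).dropWhile (· ∉ puncA) = r.dropWhile (· ∉ puncA) := by
              rw [List.dropWhile_cons_of_pos]; simp [hp]
            rw [ht, hd, List.nil_append]
            have hlen : (r.dropWhile (· ∉ puncA)).length ≤ n := by
              have h1 := List.length_dropWhile_le (fun x => decide (x ∉ puncA)) r
              have h2 : r.length ≤ n := by simpa using Nat.le_of_succ_le_succ hw
              omega
            cases h : r.dropWhile (· ∉ puncA) with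
            | nil => rw [goA'_nil, splitPunc]; simp
            | cons p r'' =>
                have hpp : p ∈ puncA := by
                  have hh := List.head?_dropWhile_not (fun x => decide (x ∉ puncA)) r
                  rw [h] at hh
                  simpa using hh
                rw [goA'_cons, if_pos hpp, splitPunc_cons, if_pos hpp,
                  ih r'' (by rw [h] at hlen; simp at hlen; omega)]
                simp

theorem goA_eq_tokensB (w : List Char) : goA [] [] w = tokensB w := by
  rw [goA_split]
  unfold tokensB
  cases h : w.getLast? with
  | none => exact goA'_eq_splitPunc w.length w (le_refl _)
  | some e =>
      by_cases he : e ∈ endPuncA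
      · simp only [he, if_true]
        rw [goA'_eq_splitPunc w.dropLast.length w.dropLast (le_refl _)]
      · simp only [he, if_false]
        exact goA'_eq_splitPunc w.length w (le_refl _)

theorem parseEnglish_flatMap (line : List String) : ∀ (acc : List String),
    line.foldl (fun nl word => goA nl [] word.toList) acc
      = acc ++ line.flatMap (fun word => goA [] [] word.toList) := by
  induction line with
  | nil => simp
  | cons w ws ih =>
      intro acc
      simp only [List.foldl_cons, List.flatMap_cons]
      rw [ih, goA_append]
      simp

-- ===== VERDICT (by name: the statement is the Claim_ definition above) =====
theorem parseEnglish_spec : Claim_equal_parseEnglish := by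
  intro line _
  unfold Spec_parseEnglish parseEnglish parseEnglish_alt
  rw [parseEnglish_flatMap line []]
  simp only [List.nil_append]
  congr 1
  funext w
  exact goA_eq_tokensB w.toList
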